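-- pv_equiv track=rewrite | github.com/nebulusneighbor/pitch-permutations | code_12pos/k7_against_major_scale_overlap.py | unique_permutations_with_fixed_first
-- ===== SOURCE A (Python) =====
-- import itertools
--
-- def rotate(sequence):
--     """Generate all rotations of a given sequence."""
--     return [sequence[i:] + sequence[:i] for i in range(len(sequence))]
--
-- def unique_permutations_with_fixed_first(n, k):
--     """Find all unique permutations of k '1's in n positions under rotation, with the first position fixed to '1'."""
--     if k == 0:
--         return ['0' * n]
--     if k == n:
--         return ['1' * n]
--
--     # Adjust k and n since we are fixing the first position to '1'
--     k = k - 1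
--     n = n - 1
--
--     combinations = list(itertools.combinations(range(n), k))
--     unique = []
--
--     for combo in combinations:
--         sequence = ['0'] * n
--         for index in combo:
--             sequence[index] = '1'
--         sequence = '1' + ''.join(sequence)  # Ensure the first position is '1'
--         rotations = rotate(sequence)
--
--         if not any(rot in unique for rot in rotations):
--             unique.append(sequence)
--
--     return unique
-- ===== SOURCE B (Python) =====
-- import itertools
--
-- def unique_permutations_with_fixed_first(n, k):
--     """Find all unique permutations of k '1's in n positions under rotation, with the first position fixed to '1'."""
--     if k == 0:
--         return ['0' * n]
--     if k == n:
--         return ['1' * n]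
--     out = []
--     for combo in itertools.combinations(range(n - 1), k - 1):
--         ones = set(combo)
--         s = '1' + ''.join('1' if i in ones else '0' for i in range(n - 1))
--         # Candidates are enumerated in strictly decreasing lexicographic order, so the
--         # representative A keeps for each rotation class is exactly the lexicographically
--         # greatest rotation; test that property of s alone, with no accumulator at all.
--         if all(s >= s[i:] + s[:i] for i in range(len(s))):
--             out.append(s)
--     return out
-- ===== Notes on version B (the rewrite author's own statement) =====
-- stated objective: faster
-- what changed: B drops A's accumulated 'unique' list and its rotation-membership scans entirely: since candidates arrive in strictly decreasing lex order, the kept representative of each rotation class is the lexicographically greatest rotation, so B keeps a candidate iff it is >= all of its own rotations - a stateless per-candidate canonicity test (standard necklace enumeration).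
import Mathlib
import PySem

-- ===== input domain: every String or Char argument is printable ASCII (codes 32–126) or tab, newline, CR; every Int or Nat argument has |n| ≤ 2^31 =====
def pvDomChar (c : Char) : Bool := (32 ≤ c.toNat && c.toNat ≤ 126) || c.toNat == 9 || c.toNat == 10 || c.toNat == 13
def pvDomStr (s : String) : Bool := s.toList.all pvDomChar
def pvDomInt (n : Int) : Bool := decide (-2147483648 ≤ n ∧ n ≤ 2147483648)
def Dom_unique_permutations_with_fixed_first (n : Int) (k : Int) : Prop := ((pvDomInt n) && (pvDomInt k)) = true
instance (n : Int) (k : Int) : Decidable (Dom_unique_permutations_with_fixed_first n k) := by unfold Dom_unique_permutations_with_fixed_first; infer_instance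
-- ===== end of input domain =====

-- B replaces A's accumulated 'unique' list and its rotation-membership scans by a stateless
-- per-candidate test ('keep s iff s is >= all its rotations', the standard necklace canonicity
-- check), correct because candidates arrive in strictly decreasing lex order (objective: faster).

-- ===== PORT A =====
-- itertools.combinations(range(m), r) in lexicographic order (library call, ported as the obvious recursion; shared by both ports since both Pythons call it)
def pvCombos {α : Type} : List α → Nat → List (List α)
  | _, 0 => [[]]
  | [], _+1 => []
  | x :: xs, r+1 =>
    -- size guard: combinations(l, r) is empty when r > len(l); itertools returns [] at once,
    -- and without this cut the recursion would explore an exponential tree of empty results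
    if xs.length < r then []
    else (pvCombos xs r).map (List.cons x) ++ pvCombos xs (r+1)

-- rotate(sequence): [sequence[i:] + sequence[:i] for i in range(len(sequence))]  (on the char-list side)
def pvRotate (s : List Char) : List (List Char) :=
  (List.range s.length).map
    (fun (i : Nat) => PySem.List.slice s (some (i : Int)) none ++ PySem.List.slice s none (some (i : Int)))

def unique_permutations_with_fixed_first (n : Int) (k : Int) : List String :=
  if k = 0 then [String.ofList (List.replicate n.toNat '0')]
  else if k = n then [String.ofList (List.replicate n.toNat '1')]
  else
    let combos := pvCombos (PySem.List.pyRange 0 (n - 1) 1) (k - 1).toNat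
    (combos.foldl (fun (unique : List (List Char)) combo =>
        let seq := combo.foldl (fun s idx => PySem.List.pySetD s idx '1')
          (List.replicate (n - 1).toNat '0')
        let s := '1' :: seq
        let rots := pvRotate s
        if !(rots.any (fun rot => unique.contains rot)) then unique ++ [s] else unique) []).map String.ofList

-- ===== PORT B =====
def unique_permutations_with_fixed_first_alt (n : Int) (k : Int) : List String :=
  if k = 0 then [String.ofList (List.replicate n.toNat '0')]
  else if k = n then [String.ofList (List.replicate n.toNat '1')]
  else
    ((pvCombos (PySem.List.pyRange 0 (n - 1) 1) (k - 1).toNat).foldl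
      (fun (out : List (List Char)) combo =>
        let s := '1' :: (PySem.List.pyRange 0 (n - 1) 1).map
            (fun i => if combo.contains i then '1' else '0')
        if (List.range s.length).all (fun i =>
            decide (PySem.List.slice s (some (i : Int)) none ++
                    PySem.List.slice s none (some (i : Int)) ≤ s))
        then out ++ [s] else out) []).map String.ofList

-- ===== PRECONDITION & SPEC =====
-- Pre_ excludes only k < 0 with k ≠ n, where A raises ValueError (itertools.combinations with r < 0).
def Pre_unique_permutations_with_fixed_first (n : Int) (k : Int) : Prop := 0 ≤ k ∨ k = n
instance (n : Int) (k : Int) : Decidable (Pre_unique_permutations_with_fixed_first n k) := by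
  unfold Pre_unique_permutations_with_fixed_first; infer_instance
def pvWitness_unique_permutations_with_fixed_first : Int × Int := (6, 3)

def Spec_unique_permutations_with_fixed_first (n : Int) (k : Int) (out : List String) : Prop := out = unique_permutations_with_fixed_first_alt n k
instance (n : Int) (k : Int) (out : List String) : Decidable (Spec_unique_permutations_with_fixed_first n k out) := by unfold Spec_unique_permutations_with_fixed_first; infer_instance

-- ===== CLAIM (what is proved, stated in full; the proofs are below) =====
def Claim_equal_unique_permutations_with_fixed_first : Prop := ∀ (n : Int) (k : Int), Dom_unique_permutations_with_fixed_first n k → Pre_unique_permutations_with_fixed_first n k → Spec_unique_permutations_with_fixed_first n k (unique_permutations_with_fixed_first n k)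

-- ===== LEMMAS AND PROOFS =====

-- the candidate tails as a list of bitstrings (proof-side only): '1'-prefixed ++ '0'-prefixed
def pvBits (m : Int) (r : Nat) : List (List Char) :=
  if r = 0 then [List.replicate m.toNat '0']
  else if m < (r : Int) then []
  else (pvBits (m-1) (r-1)).map (List.cons '1') ++ (pvBits (m-1) r).map (List.cons '0')
termination_by m.toNat
decreasing_by all_goals omega

-- the canonicity predicate B tests: s is lexicographically >= every rotation of itself
def pvCanon (s : List Char) : Bool := (pvRotate s).all (fun t => decide (t ≤ s))

theorem pv_combos_zero {α : Type} (l : List α) : pvCombos l 0 = [[]] := by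
  cases l <;> rfl

theorem pv_combos_nil {α : Type} (r : Nat) : pvCombos ([] : List α) (r+1) = [] := rfl

theorem pv_combos_nil_of_lt {α : Type} :
    ∀ (l : List α) (r : Nat), l.length < r → pvCombos l r = [] := by
  intro l
  induction l with
  | nil =>
    intro r h
    cases r with
    | zero => omega
    | succ r => rfl
  | cons x xs ih =>
    intro r h
    cases r with
    | zero => simp at h
    | succ r =>
      rw [pvCombos, if_pos (by simp at h; omega)]

theorem pv_combos_cons {α : Type} (x : α) (xs : List α) (r : Nat) :
    pvCombos (x :: xs) (r+1) = (pvCombos xs r).map (List.cons x) ++ pvCombos xs (r+1) := by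
  rw [pvCombos]
  by_cases h : xs.length < r
  · rw [if_pos h, pv_combos_nil_of_lt xs r h, pv_combos_nil_of_lt xs (r+1) (by omega)]
    rfl
  · rw [if_neg h]

-- membership in pvRotate = being a List.rotate of s by an index below the length
theorem pv_mem_pvRotate {s x : List Char} :
    x ∈ pvRotate s ↔ ∃ i, i < s.length ∧ x = s.rotate i := by
  unfold pvRotate
  rw [List.mem_map]
  constructor
  · rintro ⟨i, hi, hx⟩
    rw [List.mem_range] at hi
    refine ⟨i, hi, ?_⟩
    rw [PySem.List.slice_from_natCast, PySem.List.slice_to_natCast] at hx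
    rw [← hx, List.rotate_eq_drop_append_take (Nat.le_of_lt hi)]
  · rintro ⟨i, hi, hx⟩
    refine ⟨i, List.mem_range.2 hi, ?_⟩
    rw [PySem.List.slice_from_natCast, PySem.List.slice_to_natCast]
    rw [hx, List.rotate_eq_drop_append_take (Nat.le_of_lt hi)]

theorem pv_self_mem_pvRotate {s : List Char} (h : s ≠ []) : s ∈ pvRotate s := by
  rw [pv_mem_pvRotate]
  exact ⟨0, List.length_pos_of_ne_nil h, (List.rotate_zero s).symm⟩

theorem pv_mem_pvRotate_symm {s u : List Char} (h : u ∈ pvRotate s) : s ∈ pvRotate u := by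
  rw [pv_mem_pvRotate] at h ⊢
  obtain ⟨i, hi, rfl⟩ := h
  have hpos : 0 < s.length := by omega
  rcases Nat.eq_zero_or_pos i with rfl | hip
  · exact ⟨0, by simpa using hpos, by simp⟩
  · refine ⟨s.length - i, ?_, ?_⟩
    · rw [List.length_rotate]; omega
    · rw [List.rotate_rotate]
      have : i + (s.length - i) = s.length := by omega
      rw [this, List.rotate_length]

theorem pv_pvRotate_trans {s t x : List Char} (hx : x ∈ pvRotate t) (ht : t ∈ pvRotate s) :
    x ∈ pvRotate s := by
  rw [pv_mem_pvRotate] at hx ht ⊢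
  obtain ⟨j, hj, rfl⟩ := hx
  obtain ⟨i, hi, rfl⟩ := ht
  have hpos : 0 < s.length := by omega
  refine ⟨(i + j) % s.length, Nat.mod_lt _ hpos, ?_⟩
  rw [List.rotate_rotate, List.rotate_mod]

theorem pv_perm_of_mem_pvRotate {s x : List Char} (h : x ∈ pvRotate s) : List.Perm x s := by
  rw [pv_mem_pvRotate] at h
  obtain ⟨i, _, rfl⟩ := h
  exact List.rotate_perm s i

theorem pv_getElem?_set (b : List Char) (x j : Nat) (v : Char) :
    (b.set x v)[j]? = if j = x ∧ j < b.length then some v else b[j]? := by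
  by_cases hx : j = x
  · subst hx
    by_cases hj : j < b.length
    · simp [hj]
    · have h1 : b[j]? = none := by rw [List.getElem?_eq_none_iff]; omega
      have h2 : (b.set j v)[j]? = none := by
        rw [List.getElem?_eq_none_iff]; simp; omega
      simp [hj]
  · have hne : ¬(j = x ∧ j < b.length) := fun h => hx h.1
    rw [if_neg hne, List.getElem?_set_ne (fun h => hx h.symm)]

-- setting '1' at a list of positions, pointwise
theorem pv_foldl_set_getElem? (c : List Nat) (b : List Char) (j : Nat) :
    (c.foldl (fun s i => s.set i '1') b)[j]? =
      if j ∈ c ∧ j < b.length then some '1' else b[j]? := by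
  induction c generalizing b with
  | nil => simp
  | cons x c ih =>
    simp only [List.foldl_cons, ih, List.length_set, pv_getElem?_set, List.mem_cons]
    by_cases hj : j < b.length
    · by_cases hc : j ∈ c
      · simp [hc, hj]
      · by_cases hx : j = x
        · subst hx; simp [hc, hj]
        · simp [hc, hj, hx]
    · simp [hj]

theorem pv_foldl_set_eq_ind (c : List Nat) (m : Nat) :
    c.foldl (fun s i => s.set i '1') (List.replicate m '0')
      = (List.range m).map (fun j => if j ∈ c then '1' else '0') := by
  apply List.ext_getElem?
  intro j
  rw [pv_foldl_set_getElem?]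
  by_cases hj : j < m
  · by_cases hc : j ∈ c <;>
      simp [hc, hj]
  · simp [hj]

-- pvCombos commutes with map
theorem pv_combos_map {α β : Type} (f : α → β) :
    ∀ (l : List α) (r : Nat), pvCombos (l.map f) r = (pvCombos l r).map (List.map f) := by
  intro l
  induction l with
  | nil => intro r; cases r <;> simp [pv_combos_zero, pv_combos_nil]
  | cons x xs ih =>
    intro r
    cases r with
    | zero => simp [pv_combos_zero]
    | succ r =>
      simp only [List.map_cons, pv_combos_cons, ih, List.map_append, List.map_map]
      rfl

-- the candidate strings built from combinations are exactly pvBits, in order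
theorem pv_combos_bits :
    ∀ (m r : Nat),
      (pvCombos (List.range m) r).map
          (fun c => (List.range m).map (fun j => if j ∈ c then '1' else '0'))
        = pvBits (m : Int) r := by
  intro m
  induction m with
  | zero =>
    intro r
    cases r with
    | zero => rw [pvBits]; simp [pv_combos_zero]
    | succ r =>
      rw [pvBits]
      rw [if_neg (Nat.succ_ne_zero r), if_pos (by exact_mod_cast Nat.succ_pos r)]
      simp [pv_combos_nil]
  | succ m ih =>
    intro r
    cases r with
    | zero =>
      rw [pvBits, if_pos rfl, pv_combos_zero]
      simp
    | succ r =>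
      rw [pvBits]
      rw [if_neg (Nat.succ_ne_zero r)]
      by_cases hmr : m + 1 < r + 1
      · rw [if_pos (by exact_mod_cast hmr)]
        rw [pv_combos_nil_of_lt (List.range (m+1)) (r+1) (by simpa using hmr)]
        rfl
      · rw [if_neg (by exact_mod_cast hmr)]
        simp only [Nat.add_sub_cancel]
        have e1 : ((m+1 : Nat) : Int) - 1 = (m : Int) := by push_cast; ring
        rw [e1, ← ih r, ← ih (r+1)]
        rw [List.range_succ_eq_map, pv_combos_cons]
        rw [pv_combos_map, pv_combos_map]
        simp only [List.map_append, List.map_map]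
        congr 1
        · apply List.map_congr_left
          intro c _
          show (0 :: (List.range m).map Nat.succ).map
              (fun j => if j ∈ (0 :: c.map Nat.succ) then '1' else '0')
            = '1' :: (List.range m).map (fun j => if j ∈ c then '1' else '0')
          simp only [List.map_cons, List.map_map]
          refine congrArg₂ List.cons (by simp) ?_
          apply List.map_congr_left
          intro j _
          show (if Nat.succ j ∈ (0 :: c.map Nat.succ) then '1' else '0')
            = if j ∈ c then '1' else '0'
          by_cases hj : j ∈ c <;> simp [hj]
        · apply List.map_congr_left
          intro c _
          show (0 :: (List.range m).map Nat.succ).map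
              (fun j => if j ∈ c.map Nat.succ then '1' else '0')
            = '0' :: (List.range m).map (fun j => if j ∈ c then '1' else '0')
          simp only [List.map_cons, List.map_map]
          refine congrArg₂ List.cons (by simp) ?_
          apply List.map_congr_left
          intro j _
          show (if Nat.succ j ∈ c.map Nat.succ then '1' else '0')
            = if j ∈ c then '1' else '0'
          by_cases hj : j ∈ c <;> simp [hj]

-- characterization of pvBits membership
theorem pv_mem_pvBits :
    ∀ (m : Nat) (r : Nat) (x : List Char),
      x ∈ pvBits (m : Int) r ↔
        (x.length = m ∧ x.count '1' = r ∧ ∀ c ∈ x, c = '1' ∨ c = '0') := by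
  intro m
  induction m with
  | zero =>
    intro r x
    cases r with
    | zero =>
      rw [pvBits, if_pos rfl]
      constructor
      · intro h; simp at h; subst h; simp
      · rintro ⟨h1, h2, h3⟩
        have hx : x = [] := List.eq_nil_of_length_eq_zero h1
        subst hx; simp
    | succ r =>
      rw [pvBits, if_neg (Nat.succ_ne_zero r), if_pos (by norm_num)]
      simp only [List.not_mem_nil, false_iff]
      rintro ⟨h1, h2, _⟩
      have := List.count_le_length (l := x) (a := '1')
      omega
  | succ m ih =>
    intro r x
    cases r with
    | zero =>
      rw [pvBits, if_pos rfl]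
      have htn : (((m+1 : Nat) : Int)).toNat = m + 1 := by omega
      constructor
      · intro h
        simp only [List.mem_singleton] at h
        subst h
        refine ⟨by simp, by simp [List.count_replicate], ?_⟩
        intro c hc
        exact Or.inr (List.eq_of_mem_replicate hc)
      · rintro ⟨h1, h2, h3⟩
        have hall : ∀ c ∈ x, c = '0' := by
          intro c hc
          rcases h3 c hc with rfl | rfl
          · exact absurd h2 (by have := List.count_pos_iff.2 hc; omega)
          · rfl
        have hx : x = List.replicate x.length '0' := List.eq_replicate_of_mem hall
        simp only [List.mem_singleton, htn]
        rw [hx, h1]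
    | succ r =>
      by_cases hmr : (m + 1 : Nat) < r + 1
      · rw [pvBits, if_neg (Nat.succ_ne_zero r), if_pos (by exact_mod_cast hmr)]
        simp only [List.not_mem_nil, false_iff]
        rintro ⟨h1, h2, _⟩
        have := List.count_le_length (l := x) (a := '1')
        omega
      · rw [pvBits, if_neg (Nat.succ_ne_zero r), if_neg (by exact_mod_cast hmr)]
        have e1 : ((m+1 : Nat) : Int) - 1 = (m : Int) := by push_cast; ring
        rw [e1]
        simp only [Nat.add_sub_cancel]
        rw [List.mem_append, List.mem_map, List.mem_map]
        constructor
        · rintro (⟨t, ht, rfl⟩ | ⟨t, ht, rfl⟩)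
          · obtain ⟨l1, c1, b1⟩ := (ih r t).1 ht
            refine ⟨by simp [l1], by simp [List.count_cons_self, c1], ?_⟩
            intro c hc
            rcases List.mem_cons.1 hc with rfl | hc'
            · exact Or.inl rfl
            · exact b1 c hc'
          · obtain ⟨l1, c1, b1⟩ := (ih (r+1) t).1 ht
            refine ⟨by simp [l1], ?_, ?_⟩
            · rw [List.count_cons_of_ne (by decide), c1]
            · intro c hc
              rcases List.mem_cons.1 hc with rfl | hc'
              · exact Or.inr rfl
              · exact b1 c hc'
        · rintro ⟨h1, h2, h3⟩
          cases x with
          | nil => simp at h1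
          | cons c t =>
            have hlen : t.length = m := by simpa using h1
            have hbt : ∀ d ∈ t, d = '1' ∨ d = '0' := fun d hd => h3 d (List.mem_cons_of_mem c hd)
            rcases h3 c List.mem_cons_self with rfl | rfl
            · left
              refine ⟨t, (ih r t).2 ⟨hlen, ?_, hbt⟩, rfl⟩
              have hcc : List.count '1' ('1' :: t) = List.count '1' t + 1 := List.count_cons_self
              have : t.count '1' + 1 = r + 1 := by rw [← hcc]; exact h2
              omega
            · right
              refine ⟨t, (ih (r+1) t).2 ⟨hlen, ?_, hbt⟩, rfl⟩
              rw [← h2, List.count_cons_of_ne (by decide)]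

-- pvBits is strictly decreasing in lex order
theorem pv_pvBits_sorted : ∀ (m : Nat) (r : Nat),
    (pvBits (m : Int) r).Pairwise (fun a b => b < a) := by
  intro m
  induction m with
  | zero =>
    intro r
    cases r with
    | zero => rw [pvBits, if_pos rfl]; exact List.pairwise_singleton _ _
    | succ r =>
      rw [pvBits, if_neg (Nat.succ_ne_zero r), if_pos (by norm_num)]
      exact List.Pairwise.nil
  | succ m ih =>
    intro r
    cases r with
    | zero => rw [pvBits, if_pos rfl]; exact List.pairwise_singleton _ _
    | succ r =>
      by_cases hmr : (m + 1 : Nat) < r + 1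
      · rw [pvBits, if_neg (Nat.succ_ne_zero r), if_pos (by exact_mod_cast hmr)]
        exact List.Pairwise.nil
      · rw [pvBits, if_neg (Nat.succ_ne_zero r), if_neg (by exact_mod_cast hmr)]
        have e1 : ((m+1 : Nat) : Int) - 1 = (m : Int) := by push_cast; ring
        rw [e1]
        simp only [Nat.add_sub_cancel]
        rw [List.pairwise_append]
        refine ⟨?_, ?_, ?_⟩
        · rw [List.pairwise_map]
          exact (ih r).imp (fun h => List.cons_lt_cons_iff.2 (Or.inr ⟨rfl, h⟩))
        · rw [List.pairwise_map]
          exact (ih (r+1)).imp (fun h => List.cons_lt_cons_iff.2 (Or.inr ⟨rfl, h⟩))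
        · rintro a ha b hb
          rw [List.mem_map] at ha hb
          obtain ⟨xa, _, rfl⟩ := ha
          obtain ⟨xb, _, rfl⟩ := hb
          exact List.cons_lt_cons_iff.2 (Or.inl (by decide))

-- a nonempty list of char-lists has a lex-maximal element
theorem pv_exists_max (l : List (List Char)) (h : l ≠ []) : ∃ M ∈ l, ∀ x ∈ l, x ≤ M := by
  induction l with
  | nil => cases h rfl
  | cons a l ih =>
    rcases eq_or_ne l [] with rfl | hl
    · exact ⟨a, by simp, by simp⟩
    · obtain ⟨M, hM, hmax⟩ := ih hl
      rcases le_total a M with ham | hma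
      · refine ⟨M, List.mem_cons_of_mem _ hM, ?_⟩
        intro x hx
        rcases List.mem_cons.1 hx with rfl | hx'
        · exact ham
        · exact hmax x hx'
      · refine ⟨a, List.mem_cons_self, ?_⟩
        intro x hx
        rcases List.mem_cons.1 hx with rfl | hx'
        · exact le_refl _
        · exact le_trans (hmax x hx') hma

-- the abstract dedup-fold equals the canonicity filter, on a strictly decreasing,
-- rotation-upward-closed candidate list
theorem pv_fold_filter (cl : List (List Char))
    (hsort : cl.Pairwise (fun a b => b < a))
    (hclosed : ∀ s ∈ cl, ∀ x ∈ pvRotate s, s ≤ x → x ∈ cl)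
    (hself : ∀ s ∈ cl, s ∈ pvRotate s) :
    ∀ (rest pre : List (List Char)), cl = pre ++ rest →
      rest.foldl (fun (unique : List (List Char)) s =>
          if !((pvRotate s).any (fun rot => unique.contains rot)) then unique ++ [s] else unique)
        (pre.filter pvCanon)
      = cl.filter pvCanon := by
  intro rest
  induction rest with
  | nil =>
    intro pre hcl
    rw [List.foldl_nil, hcl, List.append_nil]
  | cons s rest ih =>
    intro pre hcl
    rw [List.foldl_cons]
    have hscl : s ∈ cl := by rw [hcl]; simp
    have hp := hsort
    rw [hcl, List.pairwise_append] at hp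
    have hcond : ((pvRotate s).any (fun rot => (pre.filter pvCanon).contains rot)) = !(pvCanon s) := by
      rcases Bool.eq_false_or_eq_true (pvCanon s) with hc | hc
      swap
      · rw [hc]
        simp only [Bool.not_false]
        rw [List.any_eq_true]
        have hne : s ∈ pvRotate s := hself s hscl
        obtain ⟨M, hM, hmax⟩ := pv_exists_max (pvRotate s) (List.ne_nil_of_mem hne)
        have hviol : ∃ x ∈ pvRotate s, s < x := by
          have hc' := hc
          rw [pvCanon, List.all_eq_false] at hc'
          obtain ⟨x, hx, hxx⟩ := hc'
          exact ⟨x, hx, lt_of_not_ge (fun hle => hxx (decide_eq_true hle))⟩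
        obtain ⟨x, hx, hsx⟩ := hviol
        have hsM : s < M := lt_of_lt_of_le hsx (hmax x hx)
        have hMcl : M ∈ cl := hclosed s hscl M hM (le_of_lt hsM)
        have hMcanon : pvCanon M = true := by
          rw [pvCanon, List.all_eq_true]
          intro y hy
          exact decide_eq_true (hmax y (pv_pvRotate_trans hy hM))
        have hMpre : M ∈ pre := by
          rw [hcl, List.mem_append] at hMcl
          rcases hMcl with h | h
          · exact h
          · rcases List.mem_cons.1 h with rfl | h'
            · exact absurd hsM (lt_irrefl _)
            · exact absurd hsM (lt_asymm ((List.pairwise_cons.1 hp.2.1).1 M h'))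
        refine ⟨M, hM, ?_⟩
        simp [List.mem_filter, hMpre, hMcanon]
      · rw [hc]
        simp only [Bool.not_true]
        rw [Bool.eq_false_iff]
        intro hany
        rw [List.any_eq_true] at hany
        obtain ⟨rot, hrot, hrmem⟩ := hany
        have hrmem' : rot ∈ pre.filter pvCanon := by simpa using hrmem
        rw [List.mem_filter] at hrmem'
        have hrs : rot ≤ s := by
          have := hc
          rw [pvCanon, List.all_eq_true] at this
          exact of_decide_eq_true (this rot hrot)
        have hsr : s ≤ rot := by
          have := hrmem'.2
          rw [pvCanon, List.all_eq_true] at this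
          exact of_decide_eq_true (this s (pv_mem_pvRotate_symm hrot))
        have heq : s = rot := le_antisymm hsr hrs
        have hlt : s < rot := hp.2.2 rot hrmem'.1 s List.mem_cons_self
        rw [heq] at hlt
        exact lt_irrefl _ hlt
    rw [hcond]
    have hfap : (pre ++ [s]).filter pvCanon
        = pre.filter pvCanon ++ (if pvCanon s then [s] else []) := by
      rw [List.filter_append]
      congr 1
      rcases Bool.eq_false_or_eq_true (pvCanon s) with hc | hc <;> simp [hc]
    have hcl' : cl = (pre ++ [s]) ++ rest := by rw [hcl, List.append_assoc]; rfl
    rcases Bool.eq_false_or_eq_true (pvCanon s) with hc | hc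
    · rw [hc]
      simp only [Bool.not_true, Bool.not_false, if_pos]
      have := ih (pre ++ [s]) hcl'
      rw [hfap, hc] at this
      simpa using this
    · rw [hc]
      simp only [Bool.not_false, Bool.not_true]
      rw [if_neg (by simp)]
      have := ih (pre ++ [s]) hcl'
      rw [hfap, hc] at this
      simpa using this

-- the append-filter fold of B's loop
theorem pv_foldl_filter (p : List Char → Bool) :
    ∀ (l : List (List Char)) (acc : List (List Char)),
      l.foldl (fun acc s => if p s then acc ++ [s] else acc) acc = acc ++ l.filter p := by
  intro l
  induction l with
  | nil => intro acc; simp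
  | cons s l ih =>
    intro acc
    rw [List.foldl_cons, ih]
    rcases Bool.eq_false_or_eq_true (p s) with hc | hc <;> simp [hc]

-- ===== VERDICT (by name: the statement is the Claim_ definition above) =====
theorem unique_permutations_with_fixed_first_spec : Claim_equal_unique_permutations_with_fixed_first := by
  intro n k _ _
  unfold Spec_unique_permutations_with_fixed_first
  by_cases hk0 : k = 0
  · simp [unique_permutations_with_fixed_first, unique_permutations_with_fixed_first_alt, hk0]
  by_cases hkn : k = n
  · simp [unique_permutations_with_fixed_first, unique_permutations_with_fixed_first_alt,
      hkn]
  simp only [unique_permutations_with_fixed_first, unique_permutations_with_fixed_first_alt,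
    if_neg hk0, if_neg hkn]
  have hrange : PySem.List.pyRange 0 (n - 1) 1
      = List.map (fun (j : Nat) => (j : Int)) (List.range (n - 1).toNat) := by
    rw [PySem.List.pyRange_one]
    simp only [sub_zero, zero_add]
  rw [hrange]
  congr 1
  rw [pv_combos_map]
  simp only [List.foldl_map]
  have hcont : ∀ (c : List Nat) (j : Nat),
      ((List.map (fun (x : Nat) => (x : Int)) c).contains ((j : Nat) : Int)) = decide (j ∈ c) := by
    intro c j
    by_cases h : j ∈ c <;>
      simp [List.mem_map, h]
  have htail : ∀ (c : List Nat),
      List.map (fun i => if (List.map (fun (j : Nat) => (j : Int)) c).contains i = true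
            then '1' else '0')
          (List.map (fun (j : Nat) => (j : Int)) (List.range (n - 1).toNat))
        = List.map (fun j => if j ∈ c then '1' else '0') (List.range (n - 1).toNat) := by
    intro c
    rw [List.map_map]
    apply List.map_congr_left
    intro j _
    simp only [Function.comp_apply, hcont]
    by_cases h : j ∈ c <;> simp [h]
  have hcanon : ∀ s : List Char,
      ((List.range s.length).all (fun i =>
        decide (PySem.List.slice s (some (i : Int)) none ++
                PySem.List.slice s none (some (i : Int)) ≤ s))) = pvCanon s := by
    intro s
    rw [pvCanon, pvRotate, List.all_map]
    rfl
  simp only [PySem.List.pySetD_natCast, pv_foldl_set_eq_ind, htail, hcanon]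
  have hclbits : (pvCombos (List.range (n - 1).toNat) (k - 1).toNat).map
        (fun c => '1' :: List.map (fun j => if j ∈ c then '1' else '0')
          (List.range (n - 1).toNat))
      = (pvBits ((n - 1).toNat : Int) (k - 1).toNat).map (List.cons '1') := by
    rw [← pv_combos_bits (n - 1).toNat (k - 1).toNat, List.map_map]
    rfl
  set cl := (pvCombos (List.range (n - 1).toNat) (k - 1).toNat).map
      (fun c => '1' :: List.map (fun j => if j ∈ c then '1' else '0')
        (List.range (n - 1).toNat)) with hcldef
  have hsort : cl.Pairwise (fun a b => b < a) := by
    rw [hclbits, List.pairwise_map]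
    exact (pv_pvBits_sorted (n - 1).toNat (k - 1).toNat).imp
      (fun h => List.cons_lt_cons_iff.2 (Or.inr ⟨rfl, h⟩))
  have hself : ∀ s ∈ cl, s ∈ pvRotate s := by
    intro s hs
    rw [hclbits, List.mem_map] at hs
    obtain ⟨t, _, rfl⟩ := hs
    exact pv_self_mem_pvRotate (by simp)
  have hclosed : ∀ s ∈ cl, ∀ x ∈ pvRotate s, s ≤ x → x ∈ cl := by
    intro s hs x hx hle
    rw [hclbits, List.mem_map] at hs
    obtain ⟨t, ht, rfl⟩ := hs
    obtain ⟨l1, c1, b1⟩ := (pv_mem_pvBits (n - 1).toNat (k - 1).toNat t).1 ht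
    have hperm := pv_perm_of_mem_pvRotate hx
    have hxlen : x.length = (n - 1).toNat + 1 := by
      rw [hperm.length_eq]; simp [l1]
    have hxbin : ∀ c ∈ x, c = '1' ∨ c = '0' := by
      intro c hc
      rcases List.mem_cons.1 (hperm.mem_iff.1 hc) with rfl | h
      · exact Or.inl rfl
      · exact b1 c h
    have hxcount : x.count '1' = (k - 1).toNat + 1 := by
      rw [hperm.count_eq]
      have : List.count '1' ('1' :: t) = List.count '1' t + 1 := List.count_cons_self
      rw [this, c1]
    cases x with
    | nil => simp at hxlen
    | cons c u =>
      have hc1 : c = '1' := by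
        rcases hxbin c List.mem_cons_self with rfl | rfl
        · rfl
        · exact absurd hle (not_le.2 (List.cons_lt_cons_iff.2 (Or.inl (by decide))))
      subst hc1
      rw [hclbits, List.mem_map]
      refine ⟨u, (pv_mem_pvBits (n - 1).toNat (k - 1).toNat u).2
        ⟨by simpa using hxlen, ?_, fun d hd => hxbin d (List.mem_cons_of_mem _ hd)⟩, rfl⟩
      have hcc : List.count '1' ('1' :: u) = List.count '1' u + 1 := List.count_cons_self
      omega
  have key : cl.foldl (fun (unique : List (List Char)) s =>
        if !((pvRotate s).any (fun rot => unique.contains rot)) then unique ++ [s]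
        else unique) []
      = cl.foldl (fun (out : List (List Char)) s =>
          if pvCanon s then out ++ [s] else out) [] := by
    have h1 := pv_fold_filter cl hsort hclosed hself cl [] rfl
    have h2 := pv_foldl_filter pvCanon cl []
    exact h1.trans (h2.trans (List.nil_append _)).symm
  exact (List.foldl_map.symm.trans key).trans List.foldl_map
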